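-- pv_equiv track=rewrite | github.com/sandeepprukmani-maker/wfm | app.py | build_subject
-- ===== SOURCE A (Python) =====
-- def build_subject(all_rules=None):
--     """
--     Builds a subject string by scanning all configured header rules.
--     Format: FROM_<replacewith>_TO_<replacewith>_CC_<replacewith>_BCC_<replacewith>
--     If a header is configured   → uses its replace_with name/key (never resolved value)
--     If a header is not configured → leaves empty: HEADER_
--     Example: FROM_sandeep@gmail.com_TO_monitoredEmployee_list_CC__BCC_
--     """
--     HEADER_ORDER = ["FROM", "TO", "CC", "BCC"]
--     # Build a lookup: header → replace_with key
--     configured = {}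
--     if all_rules:
--         for r in all_rules:
--             fw = (r.get("find_what") or "").upper()
--             if fw in HEADER_ORDER:
--                 configured[fw] = r.get("replace_with") or ""
--     # Assemble subject parts
--     parts = []
--     for h in HEADER_ORDER:
--         rw = configured.get(h, "")  # empty string if not configured
--         parts.append(h)
--         parts.append(rw)
--     return "_".join(parts)
-- ===== SOURCE B (Python) =====
-- def build_subject(all_rules=None):
--     """Same subject string, built per-header: for each header in order, scan the
--     rules directly keeping the replace_with of the last matching rule."""
--     HEADER_ORDER = ["FROM", "TO", "CC", "BCC"]
--     rules = all_rules or []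
--
--     def resolve(h):
--         val = ""
--         for r in rules:
--             if ((r.get("find_what") or "").upper()) == h:
--                 val = r.get("replace_with") or ""
--         return val
--
--     return "_".join(f"{h}_{resolve(h)}" for h in HEADER_ORDER)
-- ===== Notes on version B (the rewrite author's own statement) =====
-- stated objective: simpler
-- what changed: Drops the pre-built configured dict: for each header in order B scans the rule list directly, keeping the replace_with of the last rule whose upper-cased find_what equals the header, and joins 'HEADER_value' pieces.
import Mathlib
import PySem

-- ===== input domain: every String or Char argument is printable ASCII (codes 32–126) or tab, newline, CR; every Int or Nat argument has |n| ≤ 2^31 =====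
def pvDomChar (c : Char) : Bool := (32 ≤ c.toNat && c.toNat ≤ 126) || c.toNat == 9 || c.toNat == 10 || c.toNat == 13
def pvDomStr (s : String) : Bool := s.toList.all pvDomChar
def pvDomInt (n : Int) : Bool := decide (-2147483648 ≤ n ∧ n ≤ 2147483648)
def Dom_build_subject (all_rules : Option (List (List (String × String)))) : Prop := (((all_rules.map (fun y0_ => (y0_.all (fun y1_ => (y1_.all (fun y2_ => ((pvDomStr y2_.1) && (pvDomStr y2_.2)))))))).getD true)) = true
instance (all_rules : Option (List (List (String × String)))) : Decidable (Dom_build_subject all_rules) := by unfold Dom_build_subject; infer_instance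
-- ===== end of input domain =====

-- B replaces A's configured-dict index with a direct last-wins scan of the rules per header; objective: simpler.

-- ===== PORT A =====
def pvHeaderOrder : List String := ["FROM", "TO", "CC", "BCC"]

-- `r.get(k) or ""`: first-match association-list lookup, falsy (missing or "") becomes ""
def pvGetOr (r : List (String × String)) (k : String) : String :=
  (r.lookup k).getD ""

-- A's first loop: header → replace_with lookup dict
def pvConfigured (rs : List (List (String × String))) : PySem.Dict String String :=
  rs.foldl (fun d r =>
    if pvHeaderOrder.contains (PySem.Str.upper (pvGetOr r "find_what"))
    then d.insert (PySem.Str.upper (pvGetOr r "find_what")) (pvGetOr r "replace_with")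
    else d) PySem.Dict.empty

def build_subject (all_rules : Option (List (List (String × String)))) : String :=
  -- `if all_rules:` — None and [] both skip the loop, leaving configured = {}
  let configured : PySem.Dict String String :=
    match all_rules with
    | none => PySem.Dict.empty
    | some rs => pvConfigured rs
  let parts : List String :=
    pvHeaderOrder.foldl (fun ps h => ps ++ [h, configured.getD h ""]) []
  PySem.Str.join "_" parts

-- ===== PORT B =====
def pvResolve (rules : List (List (String × String))) (h : String) : String :=
  rules.foldl (fun v r =>
    if PySem.Str.upper (pvGetOr r "find_what") == h then pvGetOr r "replace_with" else v) ""

def build_subject_alt (all_rules : Option (List (List (String × String)))) : String :=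
  let rules := all_rules.getD []
  PySem.Str.join "_" (["FROM", "TO", "CC", "BCC"].map (fun h => h ++ "_" ++ pvResolve rules h))

-- ===== PRECONDITION & SPEC =====
def Spec_build_subject (all_rules : Option (List (List (String × String)))) (out : String) : Prop := out = build_subject_alt all_rules
instance (all_rules : Option (List (List (String × String)))) (out : String) : Decidable (Spec_build_subject all_rules out) := by unfold Spec_build_subject; infer_instance

-- ===== CLAIM (what is proved, stated in full; the proofs are below) =====
def Claim_equal_build_subject : Prop := ∀ (all_rules : Option (List (List (String × String)))), Dom_build_subject all_rules → Spec_build_subject all_rules (build_subject all_rules)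

-- ===== LEMMAS AND PROOFS =====

-- Loop invariant: A's dict entry for a configured header equals B's last-wins scan.
theorem pv_getD_eq_resolve (h : String) (hmem : pvHeaderOrder.contains h = true)
    (rs : List (List (String × String))) (d : PySem.Dict String String) :
    (rs.foldl (fun d r =>
        if pvHeaderOrder.contains (PySem.Str.upper (pvGetOr r "find_what"))
        then d.insert (PySem.Str.upper (pvGetOr r "find_what")) (pvGetOr r "replace_with")
        else d) d).getD h ""
      = rs.foldl (fun v r =>
          if PySem.Str.upper (pvGetOr r "find_what") == h then pvGetOr r "replace_with" else v)
          (d.getD h "") := by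
  induction rs generalizing d with
  | nil => rfl
  | cons r t ih =>
    simp only [List.foldl_cons]
    by_cases hfw : PySem.Str.upper (pvGetOr r "find_what") = h
    · subst hfw
      rw [if_pos hmem, ih, PySem.Dict.getD_insert_self]
      simp only [beq_self_eq_true, if_true]
    · have hbeq : (PySem.Str.upper (pvGetOr r "find_what") == h) = false := beq_false_of_ne hfw
      by_cases hc : pvHeaderOrder.contains (PySem.Str.upper (pvGetOr r "find_what")) = true
      · rw [if_pos hc, ih, PySem.Dict.getD_insert_of_ne _ _ _ (Ne.symm hfw)]
        simp only [hbeq, Bool.false_eq_true, if_false]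
      · simp only [Bool.not_eq_true] at hc
        rw [if_neg (ne_true_of_eq_false hc), ih]
        simp only [hbeq, Bool.false_eq_true, if_false]

-- A's configured dict, read at a header, equals B's resolve.
theorem pv_configured_getD (rs : List (List (String × String))) (h : String)
    (hmem : pvHeaderOrder.contains h = true) :
    (pvConfigured rs).getD h "" = pvResolve rs h := by
  rw [pvConfigured, pv_getD_eq_resolve h hmem rs PySem.Dict.empty, pvResolve,
    PySem.Dict.getD_empty]

theorem build_subject_spec : Claim_equal_build_subject := by
  intro all_rules _
  show build_subject all_rules = build_subject_alt all_rules
  cases all_rules with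
  | none => decide
  | some rs =>
    simp only [build_subject, build_subject_alt, Option.getD_some, pvHeaderOrder,
      List.foldl_cons, List.foldl_nil, List.map]
    rw [pv_configured_getD rs "FROM" (by decide), pv_configured_getD rs "TO" (by decide),
        pv_configured_getD rs "CC" (by decide), pv_configured_getD rs "BCC" (by decide)]
    -- join of the 8 flat parts equals join of the 4 "H_v" pieces
    apply String.ext
    simp [PySem.Str.join, PySem.Chars.join, String.toList_append, List.intercalate]
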